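-- pv_equiv track=rewrite | github.com/kiipo0623/Algorithm-2021 | 0311/brakconvert.py | correct
-- ===== SOURCE A (Python) =====
-- def correct(p):
--     stack = []
--     success = True
--     for string in p:
--         if string == '(':
--             stack.append('(')
--
--         elif string == ')':
--             if stack:
--                 stack.pop()
--             else:
--                 success = False
--                 break
--
--     return success
-- ===== SOURCE B (Python) =====
-- def correct(p):
--     opens = [i for i, c in enumerate(p) if c == '(']
--     closes = [i for i, c in enumerate(p) if c == ')']
--     return len(closes) <= len(opens) and all(o < c for o, c in zip(opens, closes))
-- ===== Notes on version B (the rewrite author's own statement) =====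
-- stated objective: alternative
-- what changed: Replaces the left-to-right stack scan (with break) by an occurrence-pairing algorithm: collect the index lists of '(' and ')' and accept iff there are at least as many opens as closes and the k-th open precedes the k-th close for every k.
import Mathlib
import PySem

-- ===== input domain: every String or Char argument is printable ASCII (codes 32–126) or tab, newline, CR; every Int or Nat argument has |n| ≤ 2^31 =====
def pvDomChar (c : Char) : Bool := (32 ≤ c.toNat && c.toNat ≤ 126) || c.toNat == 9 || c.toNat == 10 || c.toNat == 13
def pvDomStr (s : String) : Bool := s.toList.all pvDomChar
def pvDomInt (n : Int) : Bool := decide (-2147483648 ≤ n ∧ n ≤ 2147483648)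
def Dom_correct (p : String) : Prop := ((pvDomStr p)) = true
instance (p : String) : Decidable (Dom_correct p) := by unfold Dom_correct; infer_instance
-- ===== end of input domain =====

-- B replaces the stack scan by pairing the k-th '(' index with the k-th ')' index (alternative, same cost).


-- ===== PORT A =====
-- loop over the characters with an explicit stack; 'break' becomes returning false immediately
def correctGo : List Char → List Char → Bool
  | [], _ => true
  | c :: rest, stack =>
    if c = '(' then correctGo rest ('(' :: stack)
    else if c = ')' then
      match stack with
      | _ :: s => correctGo rest s
      | [] => false
    else correctGo rest stack

def correct (p : String) : Bool := correctGo p.toList []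

-- ===== PORT B =====
-- [i for i, c in enumerate(p) if c == ch]
def pvIdxOf (ch : Char) (l : List Char) : List Int :=
  (PySem.List.enumerate l 0).filterMap (fun ic => if ic.2 = ch then some ic.1 else none)

def correct_alt (p : String) : Bool :=
  let opens := pvIdxOf '(' p.toList
  let closes := pvIdxOf ')' p.toList
  decide (closes.length ≤ opens.length) && (opens.zip closes).all (fun oc => decide (oc.1 < oc.2))

-- ===== PRECONDITION & SPEC =====
def Spec_correct (p : String) (out : Bool) : Prop := out = correct_alt p
instance (p : String) (out : Bool) : Decidable (Spec_correct p out) := by unfold Spec_correct; infer_instance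

-- ===== CLAIM =====
def Claim_equal_correct : Prop := ∀ (p : String), Dom_correct p → Spec_correct p (correct p)

-- ===== LEMMAS AND PROOFS =====
-- index list of ch with enumeration starting at s
def pvIdxF (ch : Char) (s : Int) (l : List Char) : List Int :=
  (PySem.List.enumerate l s).filterMap (fun ic => if ic.2 = ch then some ic.1 else none)

-- pairing check with n free "credits" (unmatched opens already on the stack)
def pvCond : Nat → List Int → List Int → Bool
  | _, _, [] => true
  | n+1, os, _ :: cs => pvCond n os cs
  | 0, [], _ :: _ => false
  | 0, o :: os, c :: cs => decide (o < c) && pvCond 0 os cs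

theorem pvIdxF_cons (ch : Char) (s : Int) (c : Char) (l : List Char) :
    pvIdxF ch s (c :: l)
      = if c = ch then s :: pvIdxF ch (s+1) l else pvIdxF ch (s+1) l := by
  simp only [pvIdxF, PySem.List.enumerate_cons, List.filterMap_cons]
  split_ifs with h <;> simp

theorem pvIdxF_lb (ch : Char) (s : Int) (l : List Char) :
    ∀ x ∈ pvIdxF ch s l, s ≤ x := by
  intro x hx
  simp only [pvIdxF, List.mem_filterMap] at hx
  obtain ⟨⟨i, c⟩, hmem, hif⟩ := hx
  rw [PySem.List.mem_enumerate_iff] at hmem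
  obtain ⟨k, hk, hp⟩ := hmem
  by_cases h : c = ch <;> simp [h] at hif
  cases hp; omega

theorem pvCond_credit (s : Int) (os cs : List Int) (h : ∀ c ∈ cs, s < c) :
    ∀ n, pvCond n (s :: os) cs = pvCond (n+1) os cs := by
  induction cs with
  | nil => intro n; rfl
  | cons c cs ih =>
    intro n
    have hc : s < c := h c (List.mem_cons_self ..)
    have h' : ∀ x ∈ cs, s < x := fun x hx => h x (List.mem_cons_of_mem _ hx)
    cases n with
    | zero => simp [pvCond, hc]
    | succ n => simpa [pvCond] using ih h' n

theorem pvCond_close (s : Int) (os cs : List Int) (h : ∀ x ∈ os, s < x) :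
    pvCond 0 os (s :: cs) = false := by
  cases os with
  | nil => rfl
  | cons o os =>
    have : s < o := h o (List.mem_cons_self ..)
    simp [pvCond]; omega

theorem correctGo_eq (l : List Char) : ∀ (stack : List Char) (s : Int),
    correctGo l stack = pvCond stack.length (pvIdxF '(' s l) (pvIdxF ')' s l) := by
  induction l with
  | nil => intro stack s; simp [correctGo, pvIdxF, PySem.List.enumerate_nil]; rfl
  | cons c rest ih =>
    intro stack s
    have lbO := pvIdxF_lb '(' (s+1) rest
    have lbC := pvIdxF_lb ')' (s+1) rest
    by_cases h1 : c = '('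
    · rw [show correctGo (c :: rest) stack = correctGo rest ('(' :: stack) by
        simp [correctGo, h1]]
      rw [pvIdxF_cons, pvIdxF_cons, if_pos h1, if_neg (by simp [h1])]
      rw [pvCond_credit s _ _ (fun x hx => by have := lbC x hx; omega)]
      exact ih ('(' :: stack) (s+1)
    · by_cases h2 : c = ')'
      · rw [pvIdxF_cons, pvIdxF_cons, if_neg (by simp [h2]), if_pos h2]
        cases stack with
        | nil =>
          rw [show correctGo (c :: rest) [] = false by simp [correctGo, h2]]
          rw [show (([] : List Char).length) = 0 from rfl,
            pvCond_close s _ _ (fun x hx => by have := lbO x hx; omega)]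
        | cons x st =>
          rw [show correctGo (c :: rest) (x :: st) = correctGo rest st by
            simp [correctGo, h2]]
          rw [show ((x :: st).length) = st.length + 1 from rfl]
          rw [show pvCond (st.length + 1) (pvIdxF '(' (s+1) rest) (s :: pvIdxF ')' (s+1) rest)
              = pvCond st.length (pvIdxF '(' (s+1) rest) (pvIdxF ')' (s+1) rest) from rfl]
          exact ih st (s+1)
      · rw [show correctGo (c :: rest) stack = correctGo rest stack by
          simp [correctGo, h1, h2]]
        rw [pvIdxF_cons, pvIdxF_cons, if_neg (by simp [h1]), if_neg (by simp [h2])]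
        exact ih stack (s+1)

theorem pvCond_zero_eq (cs : List Int) : ∀ os : List Int,
    pvCond 0 os cs
      = (decide (cs.length ≤ os.length) && (os.zip cs).all (fun oc => decide (oc.1 < oc.2))) := by
  induction cs with
  | nil => intro os; simp [pvCond]
  | cons c cs ih =>
    intro os
    cases os with
    | nil => simp [pvCond]
    | cons o os =>
      simp only [pvCond, List.zip_cons_cons, List.all_cons, List.length_cons, ih os]
      by_cases hoc : o < c <;> by_cases hl : cs.length ≤ os.length <;>
        simp [hoc, hl]

-- ===== VERDICT =====
theorem correct_spec : Claim_equal_correct := by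
  intro p _
  unfold Spec_correct correct correct_alt
  rw [show pvIdxOf '(' p.toList = pvIdxF '(' 0 p.toList from rfl,
     show pvIdxOf ')' p.toList = pvIdxF ')' 0 p.toList from rfl]
  rw [correctGo_eq p.toList [] 0]
  exact pvCond_zero_eq _ _
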